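-- pv_equiv track=rewrite | github.com/NoeFlandre/fineweb-legal | src/fineweb_legal/streaming.py | _contains_boilerplate
-- ===== SOURCE A (Python) =====
-- BOILERPLATE_KEYWORDS: frozenset[str] = frozenset({
--     # Privacy & Legal boilerplate
--     "privacy policy", "cookie policy", "terms of use", "terms of service",
--     "terms and conditions", "all rights reserved", "copyright ©",
--
--     # Commercial
--     "subscribe to our newsletter", "sign up for our newsletter",
--     "shopping cart", "add to cart", "buy now", "free shipping",
--
--     # Navigation
--     "skip to content", "skip to main", "back to top", "click here to",
--
--     # Cookies
--     "we use cookies", "this website uses cookies", "accept cookies",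
--
--     # Social
--     "share on facebook", "share on twitter", "follow us on",
--
--     # News & Media
--     "latest news", "trending stories", "breaking news", "editorial",
--     "opinion piece", "op-ed", "advertisement", "sponsored content",
--     "leave a comment", "comments section", "related articles",
--     "reporter", "correspondent", "journalism", "newsroom",
-- })
--
-- BOILERPLATE_CHECK_CHARS: int = 1000
--
-- def _contains_boilerplate(text: str) -> bool:
--     """Check if text contains boilerplate in first/last 1000 chars."""
--     first_chunk = text[:BOILERPLATE_CHECK_CHARS].lower()
--     if any(kw in first_chunk for kw in BOILERPLATE_KEYWORDS):
--         return True
--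
--     if len(text) > BOILERPLATE_CHECK_CHARS:
--         last_chunk = text[-BOILERPLATE_CHECK_CHARS:].lower()
--         if any(kw in last_chunk for kw in BOILERPLATE_KEYWORDS):
--             return True
--     return False
-- ===== SOURCE B (Python) =====
-- # First-character dispatch: keywords are indexed once at import time by their
-- # first letter (storing the remainders), so the scan only tries the keywords
-- # that can possibly start at the current character.
-- _KEYWORDS = (
--     "privacy policy", "cookie policy", "terms of use", "terms of service",
--     "terms and conditions", "all rights reserved", "copyright \u00a9",
--     "subscribe to our newsletter", "sign up for our newsletter",
--     "shopping cart", "add to cart", "buy now", "free shipping",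
--     "skip to content", "skip to main", "back to top", "click here to",
--     "we use cookies", "this website uses cookies", "accept cookies",
--     "share on facebook", "share on twitter", "follow us on",
--     "latest news", "trending stories", "breaking news", "editorial",
--     "opinion piece", "op-ed", "advertisement", "sponsored content",
--     "leave a comment", "comments section", "related articles",
--     "reporter", "correspondent", "journalism", "newsroom",
-- )
--
-- _BY_FIRST: dict[str, list[str]] = {}
-- for _kw in sorted(_KEYWORDS):
--     _BY_FIRST.setdefault(_kw[0], []).append(_kw[1:])
--
--
-- def _hit(s: str) -> bool:
--     low = s.lower()
--     for i, c in enumerate(low):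
--         for rest in _BY_FIRST.get(c, ()):
--             if low.startswith(rest, i + 1):
--                 return True
--     return False
--
--
-- def _contains_boilerplate(text: str) -> bool:
--     if _hit(text[:1000]):
--         return True
--     return len(text) > 1000 and _hit(text[-1000:])
-- ===== Notes on version B (the rewrite author's own statement) =====
-- stated objective: alternative
-- what changed: B replaces A's keyword-major pass (one full substring search per keyword) by a position-major scan driven by a first-character dispatch table built once at import (keyword remainders indexed by their first letter), so at each position only the keywords that can start there are tried.
import Mathlib
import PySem

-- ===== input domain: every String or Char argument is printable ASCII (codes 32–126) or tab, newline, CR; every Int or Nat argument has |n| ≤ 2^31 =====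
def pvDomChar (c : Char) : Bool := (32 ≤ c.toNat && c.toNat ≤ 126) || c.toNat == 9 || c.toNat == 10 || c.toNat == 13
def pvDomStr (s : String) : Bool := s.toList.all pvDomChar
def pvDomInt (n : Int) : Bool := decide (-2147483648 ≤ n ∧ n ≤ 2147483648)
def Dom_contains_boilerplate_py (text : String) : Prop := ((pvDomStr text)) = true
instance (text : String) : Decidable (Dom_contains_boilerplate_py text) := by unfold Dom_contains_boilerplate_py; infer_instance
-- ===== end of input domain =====

-- B replaces A's keyword-major substring scans of each edge region by a position-major scan
-- driven by a first-character dispatch table (keyword remainders indexed by first letter).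


-- ===== PORT A =====
-- The BOILERPLATE_KEYWORDS frozenset (here in sorted order; A only takes a boolean
-- `any` over it, which is independent of the iteration order of the set).
def pvKeywords : List (List Char) :=
  ["accept cookies".toList, "add to cart".toList, "advertisement".toList,
   "all rights reserved".toList, "back to top".toList, "breaking news".toList,
   "buy now".toList, "click here to".toList, "comments section".toList,
   "cookie policy".toList, "copyright ©".toList, "correspondent".toList,
   "editorial".toList, "follow us on".toList, "free shipping".toList,
   "journalism".toList, "latest news".toList, "leave a comment".toList,
   "newsroom".toList, "op-ed".toList, "opinion piece".toList,
   "privacy policy".toList, "related articles".toList, "reporter".toList,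
   "share on facebook".toList, "share on twitter".toList, "shopping cart".toList,
   "sign up for our newsletter".toList, "skip to content".toList,
   "skip to main".toList, "sponsored content".toList,
   "subscribe to our newsletter".toList, "terms and conditions".toList,
   "terms of service".toList, "terms of use".toList,
   "this website uses cookies".toList, "trending stories".toList,
   "we use cookies".toList]

def contains_boilerplate_py (text : String) : Bool :=
  -- first_chunk = text[:1000].lower()
  let first_chunk := PySem.Chars.lower (PySem.List.slice text.toList none (some 1000))
  if pvKeywords.any (fun kw => PySem.Chars.isIn kw first_chunk) then true
  else if text.toList.length > 1000 then
    -- last_chunk = text[-1000:].lower()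
    let last_chunk := PySem.Chars.lower (PySem.List.slice text.toList (some (-1000)) none)
    if pvKeywords.any (fun kw => PySem.Chars.isIn kw last_chunk) then true
    else false
  else false

-- ===== PORT B =====
-- Source B's module-level _BY_FIRST dict (built once at import from the keyword tuple);
-- like A's frozenset above, the module constant is transcribed by its value:
-- first letter ↦ the remainders of the keywords starting with it (sorted build order).
def pvIndex : List (Char × List (List Char)) :=
  [('a', ["ccept cookies".toList, "dd to cart".toList, "dvertisement".toList, "ll rights reserved".toList]),
   ('b', ["ack to top".toList, "reaking news".toList, "uy now".toList]),
   ('c', ["lick here to".toList, "omments section".toList, "ookie policy".toList, "opyright ©".toList, "orrespondent".toList]),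
   ('e', ["ditorial".toList]),
   ('f', ["ollow us on".toList, "ree shipping".toList]),
   ('j', ["ournalism".toList]),
   ('l', ["atest news".toList, "eave a comment".toList]),
   ('n', ["ewsroom".toList]),
   ('o', ["p-ed".toList, "pinion piece".toList]),
   ('p', ["rivacy policy".toList]),
   ('r', ["elated articles".toList, "eporter".toList]),
   ('s', ["hare on facebook".toList, "hare on twitter".toList, "hopping cart".toList, "ign up for our newsletter".toList, "kip to content".toList, "kip to main".toList, "ponsored content".toList, "ubscribe to our newsletter".toList]),
   ('t', ["erms and conditions".toList, "erms of service".toList, "erms of use".toList, "his website uses cookies".toList, "rending stories".toList]),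
   ('w', ["e use cookies".toList])]

-- low.startswith(rest, i+1), character by character
def pvStarts : List Char → List Char → Bool
  | [], _ => true
  | _ :: _, [] => false
  | r :: rs, c :: cs => r == c && pvStarts rs cs

-- for rest in _BY_FIRST.get(c, ()): …
def pvTry (cs : List Char) : List (List Char) → Bool
  | [] => false
  | r :: rest => pvStarts r cs || pvTry cs rest

-- _BY_FIRST.get(c, ()) on the association list
def pvLookup (c : Char) : List (Char × List (List Char)) → List (List Char)
  | [] => []
  | (k, rs) :: rest => if k == c then rs else pvLookup c rest

-- for i, c in enumerate(low): dispatch on c, try the remainders at i+1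
def pvScan : List Char → Bool
  | [] => false
  | c :: cs => pvTry cs (pvLookup c pvIndex) || pvScan cs

def contains_boilerplate_py_alt (text : String) : Bool :=
  if pvScan (PySem.Chars.lower (PySem.List.slice text.toList none (some 1000))) then true
  else
    decide (text.toList.length > 1000) &&
      pvScan (PySem.Chars.lower (PySem.List.slice text.toList (some (-1000)) none))

-- ===== PRECONDITION & SPEC =====
def Spec_contains_boilerplate_py (text : String) (out : Bool) : Prop := out = contains_boilerplate_py_alt text
instance (text : String) (out : Bool) : Decidable (Spec_contains_boilerplate_py text out) := by unfold Spec_contains_boilerplate_py; infer_instance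

-- ===== CLAIM (what is proved, stated in full; the proofs are below) =====
def Claim_equal_contains_boilerplate_py : Prop := ∀ (text : String), Dom_contains_boilerplate_py text → Spec_contains_boilerplate_py text (contains_boilerplate_py text)

-- ===== LEMMAS AND PROOFS =====

-- the dispatch table, re-flattened, is exactly A's keyword table
set_option maxRecDepth 100000 in
set_option maxHeartbeats 1000000 in
theorem pvIndex_flat : (pvIndex.flatMap fun p => p.2.map (p.1 :: ·)) = pvKeywords := by decide

theorem pvIndex_keys_nodup : (pvIndex.map Prod.fst).Nodup := by decide

theorem pvStarts_iff (rs cs : List Char) : pvStarts rs cs = true ↔ rs <+: cs := by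
  induction rs generalizing cs with
  | nil => simp [pvStarts]
  | cons r rs ih =>
      cases cs with
      | nil => simp [pvStarts]
      | cons c cs => simp [pvStarts, ih, List.cons_prefix_cons]

theorem pvTry_iff (cs : List Char) (L : List (List Char)) :
    pvTry cs L = true ↔ ∃ r ∈ L, r <+: cs := by
  induction L with
  | nil => simp [pvTry]
  | cons r rest ih => simp [pvTry, ih, pvStarts_iff]

theorem pvLookup_iff (cs : List Char) (c : Char) (L : List (Char × List (List Char)))
    (hnd : (L.map Prod.fst).Nodup) :
    (∃ r ∈ pvLookup c L, r <+: cs) ↔ ∃ p ∈ L, p.1 = c ∧ ∃ r ∈ p.2, r <+: cs := by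
  induction L with
  | nil => simp [pvLookup]
  | cons p rest ih =>
      obtain ⟨k, rs⟩ := p
      simp only [List.map_cons, List.nodup_cons] at hnd
      by_cases hk : k = c
      · subst hk
        simp only [pvLookup, beq_self_eq_true, if_true, List.mem_cons]
        constructor
        · rintro ⟨r, hr, hpre⟩; exact ⟨(k, rs), Or.inl rfl, rfl, r, hr, hpre⟩
        · rintro ⟨q, hq | hq, hqk, r, hr, hpre⟩
          · cases hq; exact ⟨r, hr, hpre⟩
          · exact absurd (hqk ▸ List.mem_map_of_mem hq) hnd.1
      · have : (k == c) = false := by simp [hk]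
        simp only [pvLookup, this, Bool.false_eq_true, if_false, ih hnd.2, List.mem_cons]
        constructor
        · rintro ⟨q, hq, hqc, hrest⟩; exact ⟨q, Or.inr hq, hqc, hrest⟩
        · rintro ⟨q, hq | hq, hqc, hrest⟩
          · cases hq; exact absurd hqc hk
          · exact ⟨q, hq, hqc, hrest⟩

-- the dispatch step finds exactly the keywords that are a prefix of c :: cs
theorem pvHere_iff (c : Char) (cs : List Char) :
    pvTry cs (pvLookup c pvIndex) = true ↔ ∃ kw ∈ pvKeywords, kw <+: c :: cs := by
  rw [pvTry_iff, pvLookup_iff cs c pvIndex pvIndex_keys_nodup, ← pvIndex_flat]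
  simp only [List.mem_flatMap, List.mem_map]
  constructor
  · rintro ⟨p, hp, hpc, r, hr, hpre⟩
    exact ⟨p.1 :: r, ⟨p, hp, r, hr, rfl⟩, (List.cons_prefix_cons).mpr ⟨hpc, hpre⟩⟩
  · rintro ⟨kw, ⟨p, hp, r, hr, hkw⟩, hpre⟩
    subst hkw
    obtain ⟨hpc, hpre'⟩ := (List.cons_prefix_cons).mp hpre
    exact ⟨p, hp, hpc, r, hr, hpre'⟩

-- the position-major dispatch scan finds exactly the keywords occurring in s
theorem pvScan_iff (s : List Char) :
    pvScan s = true ↔ ∃ kw ∈ pvKeywords, kw <:+: s := by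
  induction s with
  | nil =>
      simp only [pvScan]
      constructor
      · intro h; cases h
      · rintro ⟨kw, hkw, hinf⟩
        have hkw0 : kw = [] := List.eq_nil_of_infix_nil hinf
        subst hkw0
        exact absurd hkw (by decide)
  | cons c cs ih =>
      simp only [pvScan, Bool.or_eq_true, pvHere_iff, ih]
      constructor
      · rintro (⟨kw, hkw, hp⟩ | ⟨kw, hkw, hi⟩)
        · exact ⟨kw, hkw, hp.isInfix⟩
        · exact ⟨kw, hkw, hi.trans (List.suffix_cons c cs).isInfix⟩
      · rintro ⟨kw, hkw, hi⟩
        rcases (List.infix_cons_iff).mp hi with hp | hi'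
        · exact Or.inl ⟨kw, hkw, hp⟩
        · exact Or.inr ⟨kw, hkw, hi'⟩

-- hence it agrees with A's keyword-major any-isIn test
theorem pvScan_eq_any (s : List Char) :
    pvScan s = pvKeywords.any (fun kw => PySem.Chars.isIn kw s) := by
  apply Bool.eq_iff_iff.mpr
  simp [pvScan_iff, List.any_eq_true, PySem.Chars.isIn_iff_infix]

-- ===== VERDICT (by name: the statement is the Claim_ definition above) =====
theorem contains_boilerplate_py_spec : Claim_equal_contains_boilerplate_py := by
  intro text _
  unfold Spec_contains_boilerplate_py contains_boilerplate_py contains_boilerplate_py_alt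
  simp only [pvScan_eq_any]
  split_ifs <;> simp_all
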